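-- pv_equiv track=rewrite | github.com/mtask/CollectiFOR | analyze/lib/parsers.py | _get_command_outputs
-- ===== SOURCE A (Python) =====
-- def _get_command_outputs(cmd_lines):
--     """
--     Extract commands from lines starting with #command: and their outputs
--     """
--     result = []
--     current = {}
--     temp_output = []
--     in_command = False
--     for idx, line in enumerate(cmd_lines):
--         line = line.rstrip("\n")
--         last_line = idx == len(cmd_lines) - 1
--
--         if line.startswith('#command:') or last_line:
--             if in_command:
--                 if last_line and not line.startswith('#command:'):
--                     temp_output.append(line)
--                 current['output'] = '\n'.join(temp_output)
--                 result.append(current)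
--                 current = {}
--                 temp_output = []
--
--             if not last_line:
--                 current['commandline'] = line.replace('#command:', '')
--                 in_command = True
--                 continue
--
--             if last_line and line.startswith('#command:'):
--                 current = {}
--                 current['commandline'] = line.replace('#command:', '')
--                 current['output'] = ''
--                 result.append(current)
--                 break
--
--         if in_command:
--             temp_output.append(line)
--     return result
-- ===== SOURCE B (Python) =====
-- def _get_command_outputs(cmd_lines):
--     """Two-phase rewrite: group lines under their '#command:' headers, then join each group's output."""
--     groups = []
--     for raw in cmd_lines:
--         line = raw.rstrip('\n')
--         if line.startswith('#command:'):
--             groups.append((line.replace('#command:', ''), []))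
--         elif groups:
--             groups[-1][1].append(line)
--     return [{'commandline': c, 'output': '\n'.join(out)} for c, out in groups]
-- ===== Notes on version B (the rewrite author's own statement) =====
-- stated objective: simpler
-- what changed: Replaces the stateful in_command/last_line flag machine with a two-phase structure: one pass that groups lines under their headers into (command, lines) pairs, then a comprehension that joins each group's output.
import Mathlib
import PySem

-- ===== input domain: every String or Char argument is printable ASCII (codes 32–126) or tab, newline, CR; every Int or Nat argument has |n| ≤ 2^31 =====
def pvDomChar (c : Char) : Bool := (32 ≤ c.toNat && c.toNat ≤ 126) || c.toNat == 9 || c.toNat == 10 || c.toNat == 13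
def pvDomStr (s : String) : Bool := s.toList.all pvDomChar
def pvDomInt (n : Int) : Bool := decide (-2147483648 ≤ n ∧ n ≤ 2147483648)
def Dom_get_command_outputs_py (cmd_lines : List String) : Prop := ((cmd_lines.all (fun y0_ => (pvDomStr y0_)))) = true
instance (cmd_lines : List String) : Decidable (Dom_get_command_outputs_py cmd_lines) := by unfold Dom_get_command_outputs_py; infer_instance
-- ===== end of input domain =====

-- B replaces A's in_command/last_line flag machine by grouping lines under headers and then joining each group (objective: simpler).

-- shared primitive: Python's line.rstrip("\n") (strip trailing newline chars only; PySem has no one-sided stripChars)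
def pvRstripNL (s : String) : String := String.ofList ((s.toList.reverse.dropWhile (· == '\n')).reverse)

-- ===== PORT A =====
-- literal transliteration of A's loop; last_line becomes the [l] pattern; result dicts are
-- rendered to association lists by the final .map PySem.Dict.items
def goA : List String → List (PySem.Dict String String) → PySem.Dict String String →
    List String → Bool → List (PySem.Dict String String)
  | [], result, _, _, _ => result
  | [l], result, current, temp, inCmd =>
    -- last_line = True
    let line := pvRstripNL l
    if PySem.Str.startswith line "#command:" then
      let result := if inCmd then result ++ [current.insert "output" (PySem.Str.join "\n" temp)]
                    else result
      result ++ [ (PySem.Dict.empty.insert "commandline"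
                    (PySem.Str.replace line "#command:" "")).insert "output" "" ]
    else
      if inCmd then
        result ++ [ current.insert "output" (PySem.Str.join "\n" (temp ++ [line])) ]
      else result
  | l :: rest, result, current, temp, inCmd =>
    let line := pvRstripNL l
    if PySem.Str.startswith line "#command:" then
      let result := if inCmd then result ++ [current.insert "output" (PySem.Str.join "\n" temp)]
                    else result
      goA rest result
        (PySem.Dict.empty.insert "commandline" (PySem.Str.replace line "#command:" "")) [] true
    else
      goA rest result current (if inCmd then temp ++ [line] else temp) inCmd

def get_command_outputs_py (cmd_lines : List String) : List (List (String × String)) :=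
  (goA cmd_lines [] PySem.Dict.empty [] false).map PySem.Dict.items

-- ===== PORT B =====
-- groups[-1][1].append(line): append to the last group's output list
def updLast (line : String) : List (String × List String) → List (String × List String)
  | [] => []
  | [(c, o)] => [(c, o ++ [line])]
  | g :: t => g :: updLast line t

def stepB (gs : List (String × List String)) (raw : String) : List (String × List String) :=
  if PySem.Str.startswith (pvRstripNL raw) "#command:" then
    gs ++ [(PySem.Str.replace (pvRstripNL raw) "#command:" "", [])]
  else
    updLast (pvRstripNL raw) gs

def finishB (g : String × List String) : List (String × String) :=
  [("commandline", g.1), ("output", PySem.Str.join "\n" g.2)]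

def get_command_outputs_py_alt (cmd_lines : List String) : List (List (String × String)) :=
  (cmd_lines.foldl stepB []).map finishB

-- ===== PRECONDITION & SPEC =====
def Spec_get_command_outputs_py (cmd_lines : List String) (out : List (List (String × String))) : Prop := out = get_command_outputs_py_alt cmd_lines
instance (cmd_lines : List String) (out : List (List (String × String))) : Decidable (Spec_get_command_outputs_py cmd_lines out) := by unfold Spec_get_command_outputs_py; infer_instance

-- ===== CLAIM (what is proved, stated in full; the proofs are below) =====
def Claim_equal_get_command_outputs_py : Prop := ∀ (cmd_lines : List String), Dom_get_command_outputs_py cmd_lines → Spec_get_command_outputs_py cmd_lines (get_command_outputs_py cmd_lines)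

-- ===== LEMMAS AND PROOFS =====

lemma updLast_ne_nil (line : String) (hs : List (String × List String)) (h : hs ≠ []) :
    updLast line hs ≠ [] := by
  match hs with
  | [] => exact absurd rfl h
  | [(c, o)] => simp [updLast]
  | g :: g' :: t => simp [updLast]

lemma updLast_append (line : String) (gs hs : List (String × List String)) (h : hs ≠ []) :
    updLast line (gs ++ hs) = gs ++ updLast line hs := by
  induction gs with
  | nil => rfl
  | cons g t ih =>
    cases t with
    | nil =>
      cases hs with
      | nil => exact absurd rfl h
      | cons h1 t1 => rfl
    | cons g2 t2 =>
      show updLast line (g :: (g2 :: t2 ++ hs)) = _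
      rw [show updLast line (g :: (g2 :: t2 ++ hs)) = g :: updLast line (g2 :: t2 ++ hs) from rfl]
      rw [ih]
      rfl

lemma stepB_ne_nil (hs : List (String × List String)) (raw : String) (h : hs ≠ []) :
    stepB hs raw ≠ [] := by
  unfold stepB
  split
  · simp
  · exact updLast_ne_nil _ _ h

lemma stepB_append (gs hs : List (String × List String)) (raw : String) (h : hs ≠ []) :
    stepB (gs ++ hs) raw = gs ++ stepB hs raw := by
  unfold stepB
  split
  · simp
  · exact updLast_append _ _ _ h

lemma foldl_stepB_append (ls : List String) (gs hs : List (String × List String)) (h : hs ≠ []) :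
    ls.foldl stepB (gs ++ hs) = gs ++ ls.foldl stepB hs := by
  induction ls generalizing hs with
  | nil => rfl
  | cons l t ih =>
    simp only [List.foldl_cons]
    rw [stepB_append _ _ _ h, ih _ (stepB_ne_nil _ _ h)]

lemma items_two (c s : String) :
    ((PySem.Dict.empty.insert "commandline" c).insert "output" s).items
      = [("commandline", c), ("output", s)] := rfl

-- invariant while a command group is open: current = {'commandline': c}, temp_output = temp
lemma mainT (ls : List String) (res : List (PySem.Dict String String)) (c : String)
    (temp : List String) (hls : ls ≠ []) :
    (goA ls res (PySem.Dict.empty.insert "commandline" c) temp true).map PySem.Dict.items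
      = res.map PySem.Dict.items ++ (ls.foldl stepB [(c, temp)]).map finishB := by
  induction ls generalizing res c temp with
  | nil => exact absurd rfl hls
  | cons l rest ih =>
    cases rest with
    | nil =>
      simp only [goA, List.foldl_cons, List.foldl_nil]
      by_cases hhd : PySem.Str.startswith (pvRstripNL l) "#command:" = true
      · rw [if_pos hhd]; simp only [if_true]
        have hstep : stepB [(c, temp)] l
            = [(c, temp), (PySem.Str.replace (pvRstripNL l) "#command:" "", [])] := by
          unfold stepB; rw [if_pos hhd]; rfl
        rw [hstep]
        simp [items_two, finishB, PySem.Str.join]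
      · rw [if_neg hhd]; simp only [if_true]
        have hstep : stepB [(c, temp)] l = [(c, temp ++ [pvRstripNL l])] := by
          unfold stepB; rw [if_neg hhd]; rfl
        rw [hstep]
        simp [items_two, finishB, PySem.Str.join]
    | cons l2 rest2 =>
      simp only [goA]
      by_cases hhd : PySem.Str.startswith (pvRstripNL l) "#command:" = true
      · rw [if_pos hhd]; simp only [if_true]
        rw [ih _ _ _ (List.cons_ne_nil _ _)]
        have hstep : stepB [(c, temp)] l
            = [(c, temp)] ++ [(PySem.Str.replace (pvRstripNL l) "#command:" "", [])] := by
          unfold stepB; rw [if_pos hhd]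
        conv_rhs => rw [List.foldl_cons, hstep, foldl_stepB_append _ _ _ (List.cons_ne_nil _ _)]
        simp [items_two, finishB, PySem.Str.join]
      · rw [if_neg hhd]; simp only [if_true]
        rw [ih _ _ _ (List.cons_ne_nil _ _)]
        have hstep : stepB [(c, temp)] l = [(c, temp ++ [pvRstripNL l])] := by
          unfold stepB; rw [if_neg hhd]; rfl
        conv_rhs => rw [List.foldl_cons, hstep]

-- before the first header: result accumulated, no group open
lemma mainF (ls : List String) (res : List (PySem.Dict String String)) :
    (goA ls res PySem.Dict.empty [] false).map PySem.Dict.items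
      = res.map PySem.Dict.items ++ (ls.foldl stepB []).map finishB := by
  induction ls generalizing res with
  | nil => simp [goA]
  | cons l rest ih =>
    cases rest with
    | nil =>
      simp only [goA, List.foldl_cons, List.foldl_nil]
      by_cases hhd : PySem.Str.startswith (pvRstripNL l) "#command:" = true
      · rw [if_pos hhd]; simp only [Bool.false_eq_true, if_false]
        have hstep : stepB [] l = [(PySem.Str.replace (pvRstripNL l) "#command:" "", [])] := by
          unfold stepB; rw [if_pos hhd]; rfl
        rw [hstep]
        simp [items_two, finishB, PySem.Str.join]
      · rw [if_neg hhd]; simp only [Bool.false_eq_true, if_false]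
        have hstep : stepB [] l = [] := by
          unfold stepB; rw [if_neg hhd]; rfl
        rw [hstep]
        simp
    | cons l2 rest2 =>
      simp only [goA]
      by_cases hhd : PySem.Str.startswith (pvRstripNL l) "#command:" = true
      · rw [if_pos hhd]; simp only [Bool.false_eq_true, if_false]
        have hstep : stepB [] l = [(PySem.Str.replace (pvRstripNL l) "#command:" "", [])] := by
          unfold stepB; rw [if_pos hhd]; rfl
        conv_rhs => rw [List.foldl_cons, hstep]
        rw [mainT _ _ _ _ (List.cons_ne_nil _ _)]
      · rw [if_neg hhd]; simp only [Bool.false_eq_true, if_false]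
        have hstep : stepB [] l = [] := by
          unfold stepB; rw [if_neg hhd]; rfl
        conv_rhs => rw [List.foldl_cons, hstep]
        rw [ih]

-- ===== VERDICT (by name: the statement is the Claim_ definition above) =====
theorem get_command_outputs_py_spec : Claim_equal_get_command_outputs_py := by
  intro cmd_lines _
  show get_command_outputs_py cmd_lines = get_command_outputs_py_alt cmd_lines
  unfold get_command_outputs_py get_command_outputs_py_alt
  rw [mainF]
  rfl
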